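-- pv_equiv track=rewrite | github.com/MahmutEsadErman/UAV-Project | python_scripts/exploration.py | center_points
-- ===== SOURCE A (Python) =====
-- def center_points(points, img_size):
--     # Calculate the bounding box of the points
--     min_x = min(points, key=lambda p: p[0])[0]
--     max_x = max(points, key=lambda p: p[0])[0]
--     min_y = min(points, key=lambda p: p[1])[1]
--     max_y = max(points, key=lambda p: p[1])[1]
--
--     # Calculate the center of the bounding box
--     center_x = (min_x + max_x) // 2
--     center_y = (min_y + max_y) // 2
--
--     # Calculate the translation needed to center the points in the image
--     translate_x = img_size // 2 - center_x
--     translate_y = img_size // 2 - center_y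
--
--     # Translate the points
--     centered_points = [(x + translate_x, y + translate_y) for x, y in points]
--     return centered_points
-- ===== SOURCE B (Python) =====
-- def center_points(points, img_size):
--     # Sort each coordinate axis and read the bounding box off the sorted
--     # lists' ends, instead of four keyed min/max scans.
--     xs = sorted(x for x, _ in points)
--     ys = sorted(y for _, y in points)
--     translate_x = img_size // 2 - (xs[0] + xs[-1]) // 2
--     translate_y = img_size // 2 - (ys[0] + ys[-1]) // 2
--     return [(x + translate_x, y + translate_y) for x, y in points]
-- ===== Notes on version B (the rewrite author's own statement) =====
-- stated objective: alternative
-- what changed: The bounding box is obtained by sorting the x- and y-coordinate lists and taking the first and last elements of each sorted list, instead of A's four keyed min/max scans over the point list.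
import Mathlib
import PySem

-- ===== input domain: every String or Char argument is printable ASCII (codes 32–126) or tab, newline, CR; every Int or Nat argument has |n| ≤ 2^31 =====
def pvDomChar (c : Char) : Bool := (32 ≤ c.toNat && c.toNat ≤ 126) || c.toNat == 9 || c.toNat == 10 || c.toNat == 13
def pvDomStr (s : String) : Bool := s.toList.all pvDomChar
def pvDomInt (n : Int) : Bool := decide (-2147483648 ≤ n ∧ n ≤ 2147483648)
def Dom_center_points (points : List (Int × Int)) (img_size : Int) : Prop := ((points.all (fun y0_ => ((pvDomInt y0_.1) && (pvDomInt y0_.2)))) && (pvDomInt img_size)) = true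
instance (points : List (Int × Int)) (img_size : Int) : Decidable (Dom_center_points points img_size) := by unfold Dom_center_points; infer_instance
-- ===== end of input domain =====

-- B obtains the bounding box by sorting each coordinate list and reading its ends,
-- instead of A's four keyed min/max scans; same return value on every non-empty
-- points list (both raise on [] — ValueError in A, IndexError in B).


-- ===== PORT A =====
-- min(points, key=λp: p[0])[0] etc.; on points = [] Python's min raises ValueError
-- (min? = none), excluded by Pre_ — the .getD default is never reached under Pre_.
def center_points (points : List (Int × Int)) (img_size : Int) : List (Int × Int) :=
  let min_x := ((PySem.List.min? points (fun p => p.1)).getD (0, 0)).1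
  let max_x := ((PySem.List.max? points (fun p => p.1)).getD (0, 0)).1
  let min_y := ((PySem.List.min? points (fun p => p.2)).getD (0, 0)).2
  let max_y := ((PySem.List.max? points (fun p => p.2)).getD (0, 0)).2
  let center_x := PySem.Int.floordiv (min_x + max_x) 2
  let center_y := PySem.Int.floordiv (min_y + max_y) 2
  let translate_x := PySem.Int.floordiv img_size 2 - center_x
  let translate_y := PySem.Int.floordiv img_size 2 - center_y
  points.map (fun p => (p.1 + translate_x, p.2 + translate_y))

-- ===== PORT B =====
-- xs = sorted(x for x,_ in points); ys = sorted(y for _,y in points);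
-- xs[0]/xs[-1] raise IndexError on [] (pyGetD default unreached under Pre_).
def center_points_alt (points : List (Int × Int)) (img_size : Int) : List (Int × Int) :=
  let xs := PySem.List.sorted (points.map (fun p => p.1)) (fun x => x) false
  let ys := PySem.List.sorted (points.map (fun p => p.2)) (fun x => x) false
  let translate_x := PySem.Int.floordiv img_size 2 -
    PySem.Int.floordiv (PySem.List.pyGetD xs 0 0 + PySem.List.pyGetD xs (-1) 0) 2
  let translate_y := PySem.Int.floordiv img_size 2 -
    PySem.Int.floordiv (PySem.List.pyGetD ys 0 0 + PySem.List.pyGetD ys (-1) 0) 2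
  points.map (fun p => (p.1 + translate_x, p.2 + translate_y))

-- ===== PRECONDITION & SPEC =====
-- Pre_ excludes only points = [], where both Pythons raise (A: ValueError from min()).
def Pre_center_points (points : List (Int × Int)) (img_size : Int) : Prop := points ≠ []
instance (points : List (Int × Int)) (img_size : Int) : Decidable (Pre_center_points points img_size) := by unfold Pre_center_points; infer_instance
def pvWitness_center_points : (List (Int × Int)) × Int := ([(1, 2), (5, -3)], 10)

def Spec_center_points (points : List (Int × Int)) (img_size : Int) (out : List (Int × Int)) : Prop := out = center_points_alt points img_size
instance (points : List (Int × Int)) (img_size : Int) (out : List (Int × Int)) : Decidable (Spec_center_points points img_size out) := by unfold Spec_center_points; infer_instance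

-- ===== CLAIM (what is proved, stated in full; the proofs are below) =====
def Claim_equal_center_points : Prop := ∀ (points : List (Int × Int)) (img_size : Int), Dom_center_points points img_size → Pre_center_points points img_size → Spec_center_points points img_size (center_points points img_size)

-- ===== LEMMAS AND PROOFS =====

-- in an ≤-sorted list every element is at most the last one
theorem pairwise_le_getLast (l : List Int) (h : l ≠ []) (hp : l.Pairwise (· ≤ ·)) :
    ∀ y ∈ l, y ≤ l.getLast h := by
  induction l with
  | nil => exact absurd rfl h
  | cons a t ih =>
      intro y hy
      rcases List.mem_cons.1 hy with rfl | hyt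
      · cases t with
        | nil => simp
        | cons b u =>
            have hab : y ≤ b := (List.pairwise_cons.1 hp).1 b (by simp)
            have := ih (by simp) (List.pairwise_cons.1 hp).2 b (by simp)
            simpa [List.getLast] using le_trans hab this
      · cases t with
        | nil => simp at hyt
        | cons b u =>
            have := ih (by simp) (List.pairwise_cons.1 hp).2 y hyt
            simpa [List.getLast] using this

-- sorted(l)[0] is the minimum: any lower bound of l that lies in l
theorem sorted_getD_zero_eq (l : List Int) (m : Int) (hm : m ∈ l)
    (hmin : ∀ y ∈ l, m ≤ y) :
    PySem.List.pyGetD (PySem.List.sorted l (fun x => x) false) 0 0 = m := by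
  cases hs : PySem.List.sorted l (fun x => x) false with
  | nil => exact absurd ((PySem.List.sorted_eq_nil_iff l (fun x => x) false).1 hs) (by rintro rfl; simp at hm)
  | cons h t =>
      rw [PySem.List.pyGetD_zero_cons]
      have hhl : h ∈ l := (PySem.List.mem_sorted l (fun x => x) false h).1 (by rw [hs]; simp)
      exact le_antisymm (PySem.List.key_head_sorted_le l (fun x => x) hs m hm) (hmin h hhl)

-- sorted(l)[-1] is the maximum: any upper bound of l that lies in l
theorem sorted_getD_last_eq (l : List Int) (M : Int) (hM : M ∈ l)
    (hmax : ∀ y ∈ l, y ≤ M) :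
    PySem.List.pyGetD (PySem.List.sorted l (fun x => x) false) (-1) 0 = M := by
  have hne : PySem.List.sorted l (fun x => x) false ≠ [] := by
    rw [Ne, PySem.List.sorted_eq_nil_iff l (fun x => x) false]; rintro rfl; simp at hM
  rw [PySem.List.pyGetD_neg_one _ _ hne]
  have hmem : (PySem.List.sorted l (fun x => x) false).getLast hne ∈ l :=
    (PySem.List.mem_sorted l (fun x => x) false _).1 (List.getLast_mem hne)
  have hp : (PySem.List.sorted l (fun x => x) false).Pairwise (· ≤ ·) := by
    simpa using PySem.List.sorted_pairwise l (fun x => x)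
  refine le_antisymm (hmax _ hmem) ?_
  exact pairwise_le_getLast _ hne hp M ((PySem.List.mem_sorted l (fun x => x) false M).2 hM)

-- ===== VERDICT (by name: the statement is the Claim_ definition above) =====
theorem center_points_spec : Claim_equal_center_points := by
  intro points img_size _ hpre
  unfold Spec_center_points
  simp only [center_points, center_points_alt]
  obtain ⟨mx, hmx⟩ := Option.ne_none_iff_exists'.1
    (fun h => hpre ((PySem.List.min?_eq_none_iff points (fun p => p.1)).1 h))
  obtain ⟨Mx, hMx⟩ := Option.ne_none_iff_exists'.1
    (fun h => hpre ((PySem.List.max?_eq_none_iff points (fun p => p.1)).1 h))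
  obtain ⟨my, hmy⟩ := Option.ne_none_iff_exists'.1
    (fun h => hpre ((PySem.List.min?_eq_none_iff points (fun p => p.2)).1 h))
  obtain ⟨My, hMy⟩ := Option.ne_none_iff_exists'.1
    (fun h => hpre ((PySem.List.max?_eq_none_iff points (fun p => p.2)).1 h))
  rw [show PySem.List.min? points (fun p => p.1) = some mx from hmx,
      show PySem.List.max? points (fun p => p.1) = some Mx from hMx,
      show PySem.List.min? points (fun p => p.2) = some my from hmy,
      show PySem.List.max? points (fun p => p.2) = some My from hMy]
  rw [sorted_getD_zero_eq (points.map (fun p => p.1)) mx.1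
        (List.mem_map_of_mem (PySem.List.min?_mem hmx))
        (by rintro y hy; obtain ⟨z, hz, rfl⟩ := List.mem_map.1 hy
            exact PySem.List.min?_isMin hmx z hz),
      sorted_getD_last_eq (points.map (fun p => p.1)) Mx.1
        (List.mem_map_of_mem (PySem.List.max?_mem hMx))
        (by rintro y hy; obtain ⟨z, hz, rfl⟩ := List.mem_map.1 hy
            exact PySem.List.max?_isMax hMx z hz),
      sorted_getD_zero_eq (points.map (fun p => p.2)) my.2
        (List.mem_map_of_mem (PySem.List.min?_mem hmy))
        (by rintro y hy; obtain ⟨z, hz, rfl⟩ := List.mem_map.1 hy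
            exact PySem.List.min?_isMin hmy z hz),
      sorted_getD_last_eq (points.map (fun p => p.2)) My.2
        (List.mem_map_of_mem (PySem.List.max?_mem hMy))
        (by rintro y hy; obtain ⟨z, hz, rfl⟩ := List.mem_map.1 hy
            exact PySem.List.max?_isMax hMy z hz)]
  simp
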